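-- pv_equiv track=rewrite | github.com/alexandraback/datacollection | solutions_5686275109552128_0/Python/stalker/pancakes.py | solve
-- ===== SOURCE A (Python) =====
-- def solve(D):
--     D.sort(reverse=True)
--     best = D[0]
--     acc = 0
--     while acc < best:
--         if D[0] < 3:
--             return min(best, acc + D[0])
--
--         half = D[0] // 2
--         D[0] -= half
--         D.append(half)
--         D.sort(reverse=True)
--         acc += 1
--
--         if acc + D[0] < best:
--             best = acc + D[0]
--
--     return best
-- ===== SOURCE B (Python) =====
-- def solve(D):
--     # Level compression: instead of splitting one tallest stack per step, keep a
--     # counter {height: multiplicity} and split ALL stacks of the current maximum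
--     # height in one arithmetic step. Does not mutate the caller's list.
--     cnt = {}
--     for v in D:
--         cnt[v] = cnt.get(v, 0) + 1
--     m = max(cnt)
--     best = m
--     acc = 0
--     while acc < best:
--         if m < 3:
--             return min(best, acc + m)
--         c = cnt.pop(m)
--         if best - acc <= c:
--             return best
--         half = m // 2
--         cnt[m - half] = cnt.get(m - half, 0) + c
--         cnt[half] = cnt.get(half, 0) + c
--         acc += c
--         m = max(cnt)
--         if acc + m < best:
--             best = acc + m
--     return best
-- ===== Notes on version B (the rewrite author's own statement) =====
-- stated objective: alternative
-- what changed: B keeps a counter {height: multiplicity} and splits ALL stacks of the current maximum height in one arithmetic step per level, instead of A's one-split-then-full-re-sort per iteration; B also leaves the caller's list unmutated (A sorts/appends it in place).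
-- outside the precondition, e.g. on solve([]): A raises IndexError, B raises ValueError
import Mathlib
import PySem

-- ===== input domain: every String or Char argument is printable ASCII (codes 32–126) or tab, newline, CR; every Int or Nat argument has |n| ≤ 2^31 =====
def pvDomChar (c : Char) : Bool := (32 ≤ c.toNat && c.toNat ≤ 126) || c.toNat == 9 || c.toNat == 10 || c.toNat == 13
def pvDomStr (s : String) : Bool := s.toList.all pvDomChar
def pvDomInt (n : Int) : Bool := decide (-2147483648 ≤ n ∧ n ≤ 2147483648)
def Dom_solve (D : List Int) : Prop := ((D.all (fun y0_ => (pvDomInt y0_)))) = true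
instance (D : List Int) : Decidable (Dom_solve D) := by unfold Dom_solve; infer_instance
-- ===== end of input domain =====

-- B replaces A's per-split re-sort (one split of the tallest stack per iteration) by a
-- height counter that splits ALL stacks of the current maximum height in one arithmetic
-- step; equivalence of return values (A additionally sorts/appends its argument in place,
-- B leaves the caller's list unchanged).

-- ===== PORT A =====
-- Port of `D.sort(reverse=True)` on Int lists: Python's sort is a stable descending
-- sort; on Int equal elements are identical values, so the stable mergeSort below
-- computes exactly Python's resulting list (and evaluates in O(n log n)).
def pySortDesc (l : List Int) : List Int := l.mergeSort (fun a b => decide (b ≤ a))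

-- while loop of A as fuel recursion; acc strictly increases and best never increases,
-- so (initial best).toNat + 1 fuel is never exhausted before the `acc < best` test fails.
def solveLoopA : Nat → List Int → Int → Int → Int
  | 0, _, best, _ => best
  | fuel+1, Ds, best, acc =>
    if acc < best then
      let d0 := Ds.headD 0
      if d0 < 3 then min best (acc + d0)
      else
        let half := PySem.Int.floordiv d0 2
        let Ds' := pySortDesc ((d0 - half) :: Ds.tail ++ [half])
        let acc' := acc + 1
        let d0' := Ds'.headD 0
        let best' := if acc' + d0' < best then acc' + d0' else best
        solveLoopA fuel Ds' best' acc'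
    else best

def solve (D : List Int) : Int :=
  let Ds := pySortDesc D
  let best := Ds.headD 0       -- D[0]; Pre_solve excludes [] (IndexError)
  solveLoopA (best.toNat + 1) Ds best 0

-- ===== PORT B =====
-- max(xs) for a nonempty list/key list (Python raises on empty; unreachable under Pre_solve)
def listMax : List Int → Int
  | [] => 0
  | x :: t => t.foldl max x

-- while loop of B; one fuel unit per level (the maximum strictly decreases each level,
-- and acc grows by ≥ 1 per level, so (initial best).toNat + 1 fuel is never exhausted).
def solveLoopB : Nat → PySem.Dict Int Int → Int → Int → Int → Int
  | 0, _, best, _, _ => best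
  | fuel+1, cnt, best, acc, m =>
    if acc < best then
      if m < 3 then min best (acc + m)
      else
        let c := cnt.getD m 0         -- cnt.pop(m): m = max(cnt) is always a key here
        let cnt1 := cnt.erase m
        if best - acc ≤ c then best
        else
          let half := PySem.Int.floordiv m 2
          let cnt2 := cnt1.insert (m - half) (cnt1.getD (m - half) 0 + c)
          let cnt3 := cnt2.insert half (cnt2.getD half 0 + c)
          let acc' := acc + c
          let m' := listMax cnt3.keys -- max(cnt); key list is nonempty here
          let best' := if acc' + m' < best then acc' + m' else best
          solveLoopB fuel cnt3 best' acc' m'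
    else best

def solve_alt (D : List Int) : Int :=
  let cnt := D.foldl (fun d v => d.insert v (d.getD v 0 + 1)) PySem.Dict.empty
  let m := listMax cnt.keys    -- max(cnt); Pre_solve excludes [] (ValueError)
  solveLoopB (m.toNat + 1) cnt m 0 m

-- ===== PRECONDITION & SPEC =====
-- Pre_solve excludes only the empty list, on which A raises IndexError (D[0]).
def Pre_solve (D : List Int) : Prop := D ≠ []
instance (D : List Int) : Decidable (Pre_solve D) := by unfold Pre_solve; infer_instance
def pvWitness_solve : List Int := [10, 5]
def Spec_solve (D : List Int) (out : Int) : Prop := out = solve_alt D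
instance (D : List Int) (out : Int) : Decidable (Spec_solve D out) := by unfold Spec_solve; infer_instance

-- ===== CLAIM (what is proved, stated in full; the proofs are below) =====
def Claim_equal_solve : Prop := ∀ (D : List Int), Dom_solve D → Pre_solve D → Spec_solve D (solve D)

-- ===== LEMMAS AND PROOFS =====

-- listMax is max(): a member of a nonempty list, and an upper bound
theorem listMax_mem (l : List Int) (h : l ≠ []) : listMax l ∈ l := by
  match l with
  | x :: t =>
    have := PySem.List.max?_mem (xs := x :: t) (key := fun y => y)
      (m := listMax (x :: t)) (by rw [PySem.List.max?_id_cons]; rfl)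
    exact this

theorem listMax_le (l : List Int) (y : Int) (hy : y ∈ l) : y ≤ listMax l := by
  match l with
  | x :: t =>
    have := PySem.List.max?_isMax (xs := x :: t) (key := fun y => y)
      (m := listMax (x :: t)) (by rw [PySem.List.max?_id_cons]; rfl)
    exact this y hy

theorem listMax_congr (l₁ l₂ : List Int) (h₁ : l₁ ≠ []) (h₂ : l₂ ≠ [])
    (h : ∀ x, x ∈ l₁ ↔ x ∈ l₂) : listMax l₁ = listMax l₂ := by
  apply le_antisymm
  · exact listMax_le _ _ ((h _).mp (listMax_mem _ h₁))
  · exact listMax_le _ _ ((h _).mpr (listMax_mem _ h₂))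

theorem listMax_perm (l₁ l₂ : List Int) (h : l₁.Perm l₂) : listMax l₁ = listMax l₂ := by
  rcases l₁ with _ | ⟨x, t⟩
  · rw [h.nil_eq]
  · refine listMax_congr _ _ (by simp) (fun he => ?_) (fun x => h.mem_iff)
    rw [he] at h
    exact absurd h.eq_nil (by simp)

-- A's loop on the underlying multiset: split one occurrence of the maximum per step
def loopM : Nat → List Int → Int → Int → Int
  | 0, _, best, _ => best
  | fuel+1, st, best, acc =>
    if acc < best then
      let m := listMax st
      if m < 3 then min best (acc + m)
      else
        let half := PySem.Int.floordiv m 2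
        let st' := (m - half) :: st.erase m ++ [half]
        let acc' := acc + 1
        let m' := listMax st'
        let best' := if acc' + m' < best then acc' + m' else best
        loopM fuel st' best' acc'
    else best

theorem loopM_exit (f : Nat) (st : List Int) (best acc : Int) (h : ¬ acc < best) :
    loopM f st best acc = best := by
  cases f <;> simp [loopM, h]

theorem loopM_perm (f : Nat) : ∀ (st st' : List Int) (best acc : Int), st.Perm st' →
    loopM f st best acc = loopM f st' best acc := by
  induction f with
  | zero => intros; rfl
  | succ f ih =>
    intro st st' best acc hp
    simp only [loopM]
    rw [listMax_perm _ _ hp]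
    by_cases h1 : acc < best
    · by_cases h2 : listMax st' < 3
      · simp [h1, h2]
      · simp only [if_pos h1, if_neg h2]
        rw [listMax_perm ((listMax st' - _) :: st.erase (listMax st') ++ _)
          ((listMax st' - _) :: st'.erase (listMax st') ++ _)
          (((hp.erase _).cons _).append_right _),
          ih _ _ _ _ (((hp.erase _).cons _).append_right _)]
    · simp [h1]

-- sorted-descending head is the maximum: A's D[0] reads max of the multiset
theorem headD_sorted_desc (l : List Int) (hne : l ≠ [])
    (hs : l.Pairwise (fun a b => b ≤ a)) : l.headD 0 = listMax l := by
  match l with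
  | x :: t =>
    apply le_antisymm (listMax_le _ _ (by simp))
    have hub : ∀ y ∈ x :: t, y ≤ x := by
      intro y hy
      rcases List.mem_cons.mp hy with rfl | hy'
      · exact le_refl _
      · exact (List.pairwise_cons.mp hs).1 y hy'
    exact hub _ (listMax_mem _ hne)

theorem pySortDesc_perm (l : List Int) : (pySortDesc l).Perm l := List.mergeSort_perm ..

theorem pySortDesc_pairwise (l : List Int) :
    (pySortDesc l).Pairwise (fun a b => b ≤ a) := by
  have h := List.pairwise_mergeSort (le := fun a b : Int => decide (b ≤ a))
    (fun a b c hab hbc => by simp at *; omega)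
    (fun a b => by simp; omega) l
  simpa using h

theorem pySortDesc_ne_nil (l : List Int) (h : l ≠ []) : pySortDesc l ≠ [] := by
  intro he
  have : ([] : List Int).Perm l := he ▸ pySortDesc_perm l
  exact h this.nil_eq.symm

-- Part 1: A's loop equals the multiset loop (A's state is the sorted image of the multiset)
theorem loopA_eq_loopM (f : Nat) : ∀ (Ds : List Int) (best acc : Int), Ds ≠ [] →
    Ds.Pairwise (fun a b => b ≤ a) →
    solveLoopA f Ds best acc = loopM f Ds best acc := by
  induction f with
  | zero => intros; rfl
  | succ f ih =>
    intro Ds best acc hne hs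
    match Ds with
    | x :: t =>
      simp only [solveLoopA, loopM, List.headD_cons, List.tail_cons]
      have hhead : x = listMax (x :: t) := by
        have := headD_sorted_desc _ hne hs; simpa using this
      rw [← hhead]
      by_cases h1 : acc < best
      · by_cases h2 : x < 3
        · simp [h1, h2]
        · simp only [if_pos h1, if_neg h2]
          set half := PySem.Int.floordiv x 2 with hhalf
          have herase : (x :: t).erase x = t := List.erase_cons_head ..
          simp only [herase]
          set L := (x - half) :: t ++ [half] with hL
          have hperm : (pySortDesc L).Perm L := pySortDesc_perm L
          have hne' : pySortDesc L ≠ [] := pySortDesc_ne_nil L (by simp [hL])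
          have hs' : (pySortDesc L).Pairwise (fun a b => b ≤ a) :=
            pySortDesc_pairwise L
          have hhead' : (pySortDesc L).headD 0 = listMax L := by
            rw [headD_sorted_desc _ hne' hs', listMax_perm _ _ hperm]
          rw [hhead', ih _ _ _ hne' hs', loopM_perm _ _ _ _ _ hperm]
      · simp [h1]

-- multiset of a counter dict
def mset (ps : List (Int × Int)) : List Int :=
  ps.flatMap (fun p => List.replicate p.2.toNat p.1)

theorem count_mset (ps : List (Int × Int)) (v : Int) (hnd : (ps.map Prod.fst).Nodup) :
    (mset ps).count v = ((PySem.Dict.mk ps).getD v 0).toNat := by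
  induction ps with
  | nil => simp [mset, PySem.Dict.getD, PySem.Dict.get?]
  | cons p ps ih =>
    obtain ⟨a, b⟩ := p
    simp only [List.map_cons, List.nodup_cons] at hnd
    have hrec := ih hnd.2
    simp only [mset, List.flatMap_cons, List.count_append, List.count_replicate,
      PySem.Dict.getD, PySem.Dict.get?_mk_cons] at *
    by_cases h : v = a
    · have hnot : (ps.flatMap (fun p => List.replicate p.2.toNat p.1)).count v = 0 := by
        rw [List.count_eq_zero]
        intro hv
        rcases List.mem_flatMap.mp hv with ⟨q, hq, hvq⟩
        have hq1 : q.1 = a := (List.eq_of_mem_replicate hvq).symm.trans h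
        exact hnd.1 (hq1 ▸ List.mem_map_of_mem hq)
      subst h
      simp [hnot]
    · have hne2 : ¬ ((a == v) = true) := by
        simp only [beq_iff_eq]; exact fun he => h he.symm
      simp [hne2, hrec]

theorem get?_erase (d : PySem.Dict Int Int) (k v : Int) :
    (d.erase k).get? v = if v = k then none else d.get? v := by
  rcases d with ⟨ps⟩
  induction ps with
  | nil => simp [PySem.Dict.erase, PySem.Dict.get?]
  | cons p ps ih =>
    obtain ⟨a, b⟩ := p
    simp only [PySem.Dict.erase, PySem.Dict.get?] at ih ⊢
    by_cases h1 : a = k <;> by_cases h2 : a = v <;> by_cases h3 : v = k <;>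
      simp_all

-- floor-halving bounds for m ≥ 3
theorem half_bounds (m : Int) (hm : 3 ≤ m) :
    1 ≤ PySem.Int.floordiv m 2 ∧ PySem.Int.floordiv m 2 < m ∧
    2 ≤ m - PySem.Int.floordiv m 2 ∧ m - PySem.Int.floordiv m 2 < m := by
  have h := (PySem.Int.floordiv_eq_iff_of_pos (a := m) (b := 2)
    (q := PySem.Int.floordiv m 2) (by norm_num)).mp rfl
  omega

theorem listMax_replicate_append (c : Nat) (hc : 0 < c) (m : Int) (R : List Int)
    (hR : ∀ x ∈ R, x ≤ m) : listMax (List.replicate c m ++ R) = m := by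
  apply le_antisymm
  · have hmem := listMax_mem (List.replicate c m ++ R) (by
      intro he
      have : m ∈ List.replicate c m ++ R :=
        List.mem_append_left _ (List.mem_replicate.mpr ⟨by omega, rfl⟩)
      simp [he] at this)
    rcases List.mem_append.mp hmem with hl | hr
    · exact le_of_eq (List.eq_of_mem_replicate hl)
    · exact hR _ hr
  · exact listMax_le _ _ (List.mem_append_left _ (List.mem_replicate.mpr ⟨by omega, rfl⟩))

-- Part 2 (the level lemma): c consecutive splits of A's loop, all at maximum m
theorem levelM (m : Int) (hm : 3 ≤ m) :
  ∀ (c : Nat), 0 < c → ∀ (f : Nat) (R : List Int) (best acc : Int),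
  (∀ x ∈ R, x < m) → acc < best → best ≤ acc + m → (best - acc).toNat ≤ f →
  loopM f (List.replicate c m ++ R) best acc =
    if best - acc ≤ (c : Int) then best
    else
      loopM (f - c)
        (R ++ List.replicate c (m - PySem.Int.floordiv m 2)
           ++ List.replicate c (PySem.Int.floordiv m 2))
        (if acc + (c:Int) + listMax (R ++ List.replicate c (m - PySem.Int.floordiv m 2)
              ++ List.replicate c (PySem.Int.floordiv m 2)) < best
         then acc + (c:Int) + listMax (R ++ List.replicate c (m - PySem.Int.floordiv m 2)
              ++ List.replicate c (PySem.Int.floordiv m 2))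
         else best)
        (acc + (c:Int)) := by
  intro c
  induction c with
  | zero => intro h; exact absurd h (Nat.lt_irrefl 0)
  | succ c ih =>
    intro _ f R best acc hR hacc hbm hf
    obtain ⟨hh1, hh2, hh3, hh4⟩ := half_bounds m hm
    obtain ⟨f', rfl⟩ : ∃ f', f = f' + 1 := by
      cases f with
      | zero => exfalso; omega
      | succ f' => exact ⟨f', rfl⟩
    have hmax : listMax (List.replicate (c+1) m ++ R) = m :=
      listMax_replicate_append _ (by omega) _ _ (fun x hx => le_of_lt (hR x hx))
    have herase : (List.replicate (c+1) m ++ R).erase m = List.replicate c m ++ R := by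
      rw [List.replicate_succ, List.cons_append, List.erase_cons_head]
    simp only [loopM]
    rw [hmax, if_pos hacc, if_neg (by omega : ¬ m < 3), herase]
    rcases Nat.eq_zero_or_pos c with hc0 | hcpos
    · -- base: a single stack of height m
      subst hc0
      simp only [List.replicate_zero, List.nil_append] at *
      have hperm : (((m - PySem.Int.floordiv m 2) :: R) ++ [PySem.Int.floordiv m 2]).Perm
          (R ++ [m - PySem.Int.floordiv m 2] ++ [PySem.Int.floordiv m 2]) := by
        refine List.perm_iff_count.mpr fun a => ?_
        simp only [List.count_cons, List.count_append, List.count_nil]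
        split_ifs <;> omega
      have hm1 : listMax (((m - PySem.Int.floordiv m 2) :: R) ++ [PySem.Int.floordiv m 2])
          = listMax (R ++ [m - PySem.Int.floordiv m 2] ++ [PySem.Int.floordiv m 2]) :=
        listMax_perm _ _ hperm
      by_cases hend : best - acc ≤ (1:Int)
      · have hge : 2 ≤ listMax (((m - PySem.Int.floordiv m 2) :: R) ++ [PySem.Int.floordiv m 2]) :=
          le_trans hh3 (listMax_le _ _ (List.mem_append_left _ List.mem_cons_self))
        rw [if_neg (show ¬ acc + 1 + listMax (((m - PySem.Int.floordiv m 2)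
              :: R) ++ [PySem.Int.floordiv m 2]) < best by omega),
          loopM_exit _ _ _ _ (by omega),
          if_pos (show best - acc ≤ ((0+1 : Nat) : Int) by push_cast; omega)]
      · rw [if_neg (show ¬ best - acc ≤ ((0+1 : Nat) : Int) by push_cast; omega),
          loopM_perm _ _ _ _ _ hperm, hm1]
        norm_num
    · -- step: split one of the c+1 stacks of height m, then the remaining c
      have hperm₁ : (((m - PySem.Int.floordiv m 2) :: (List.replicate c m ++ R)) ++ [PySem.Int.floordiv m 2]).Perm
          (List.replicate c m ++ (R ++ [m - PySem.Int.floordiv m 2] ++ [PySem.Int.floordiv m 2])) := by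
        refine List.perm_iff_count.mpr fun a => ?_
        simp only [List.count_cons, List.count_append, List.count_nil]
        split_ifs <;> omega
      have hm₁ : listMax (((m - PySem.Int.floordiv m 2) :: (List.replicate c m ++ R)) ++ [PySem.Int.floordiv m 2]) = m := by
        rw [listMax_perm _ _ hperm₁]
        exact listMax_replicate_append c hcpos m _ (by
          intro x hx
          rcases List.mem_append.mp hx with hx | hx
          · rcases List.mem_append.mp hx with hx | hx
            · exact le_of_lt (hR x hx)
            · simp at hx; omega
          · simp at hx; omega)
      rw [hm₁, if_neg (by omega : ¬ acc + 1 + m < best)]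
      by_cases hend : best - acc ≤ (1:Int)
      · rw [loopM_exit _ _ _ _ (by omega), if_pos (by push_cast; omega)]
      · rw [loopM_perm _ _ _ _ _ hperm₁,
          ih hcpos f' (R ++ [m - PySem.Int.floordiv m 2] ++ [PySem.Int.floordiv m 2]) best (acc + 1)
            (by
              intro x hx
              rcases List.mem_append.mp hx with hx | hx
              · rcases List.mem_append.mp hx with hx | hx
                · exact hR x hx
                · simp at hx; omega
              · simp at hx; omega)
            (by omega) (by omega) (by omega)]
        have hiff : (best - (acc + 1) ≤ (c:Int)) ↔ (best - acc ≤ ((c+1 : Nat) : Int)) := by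
          push_cast; omega
        have hL : ((R ++ [m - PySem.Int.floordiv m 2] ++ [PySem.Int.floordiv m 2])
              ++ List.replicate c (m - PySem.Int.floordiv m 2)
              ++ List.replicate c (PySem.Int.floordiv m 2)).Perm
            (R ++ List.replicate (c+1) (m - PySem.Int.floordiv m 2)
               ++ List.replicate (c+1) (PySem.Int.floordiv m 2)) := by
          refine List.perm_iff_count.mpr fun a => ?_
          simp only [List.count_cons, List.count_append, List.count_replicate,
            List.count_nil]
          split_ifs <;> omega
        have hMax := listMax_perm _ _ hL
        have hacc2 : acc + 1 + (c:Int) = acc + ((c+1 : Nat) : Int) := by push_cast; ring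
        have hfuel : f' - c = (f' + 1) - (c+1) := by omega
        rw [if_congr hiff rfl (by
          rw [loopM_perm _ _ _ _ _ hL, hMax, hacc2, hfuel])]

theorem loopB_exit (g : Nat) (cnt : PySem.Dict Int Int) (best acc m : Int)
    (h : ¬ acc < best) : solveLoopB g cnt best acc m = best := by
  cases g <;> simp [solveLoopB, h]

theorem getD_nonneg (d : PySem.Dict Int Int) (hpos : ∀ p ∈ d.items, 1 ≤ p.2) (v : Int) :
    0 ≤ d.getD v 0 := by
  rw [PySem.Dict.getD_eq_get?_getD]
  cases hg : d.get? v with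
  | none => simp
  | some w =>
    have := hpos _ (PySem.Dict.mem_items_of_get?_eq_some d hg)
    simp; omega

theorem nodup_keys_erase (d : PySem.Dict Int Int) (k : Int) (h : d.keys.Nodup) :
    (d.erase k).keys.Nodup := by
  have hsub : (d.erase k).items.Sublist d.items := List.filter_sublist
  exact (hsub.map Prod.fst).nodup h

theorem mem_mset_iff_keys (d : PySem.Dict Int Int) (hpos : ∀ p ∈ d.items, 1 ≤ p.2)
    (v : Int) : v ∈ mset d.items ↔ v ∈ d.keys := by
  constructor
  · intro hv
    rcases List.mem_flatMap.mp hv with ⟨p, hp, hvp⟩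
    rw [List.eq_of_mem_replicate hvp]
    exact List.mem_map_of_mem hp
  · intro hv
    rcases List.mem_map.mp hv with ⟨p, hp, rfl⟩
    refine List.mem_flatMap.mpr ⟨p, hp, ?_⟩
    refine List.mem_replicate.mpr ⟨?_, rfl⟩
    have := hpos p hp
    omega

-- Part 3: the multiset loop equals B's counter loop
theorem loopM_eq_loopB (n : Nat) :
    ∀ (f g : Nat) (st : List Int) (cnt : PySem.Dict Int Int) (best acc m : Int),
    (best - acc).toNat ≤ n → (best - acc).toNat ≤ f → (best - acc).toNat ≤ g →
    cnt.keys.Nodup → (∀ p ∈ cnt.items, 1 ≤ p.2) → st.Perm (mset cnt.items) →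
    st ≠ [] → m = listMax st → best ≤ acc + m →
    loopM f st best acc = solveLoopB g cnt best acc m := by
  induction n with
  | zero =>
    intro f g st cnt best acc m hn hf hg _ _ _ _ _ _
    rw [loopM_exit _ _ _ _ (by omega), loopB_exit _ _ _ _ _ (by omega)]
  | succ n ih =>
    intro f g st cnt best acc m hn hf hg hnd hpos hperm hne hm hbm
    by_cases hacc : acc < best
    · obtain ⟨f', rfl⟩ : ∃ f', f = f' + 1 := by
        cases f with
        | zero => exfalso; omega
        | succ f' => exact ⟨f', rfl⟩
      obtain ⟨g', rfl⟩ : ∃ g', g = g' + 1 := by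
        cases g with
        | zero => exfalso; omega
        | succ g' => exact ⟨g', rfl⟩
      have hndl : (cnt.items.map Prod.fst).Nodup := hnd
      have hcount : ∀ v, st.count v = (cnt.getD v 0).toNat := fun v => by
        rw [hperm.count_eq]; exact count_mset _ _ hndl
      have hmmem : m ∈ st := hm ▸ listMax_mem st hne
      have hub : ∀ x ∈ st, x ≤ m := fun x hx => hm ▸ listMax_le st x hx
      by_cases h3 : m < 3
      · simp only [loopM, solveLoopB, ← hm]
        simp [hacc, h3]
      · -- split st into the c' copies of the maximum m and the rest R
        have hm3 : 3 ≤ m := by omega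
        set c' := st.count m with hc'
        set R := st.filter (fun x => !(x == m)) with hR
        have hcountR : ∀ v, R.count v = if v = m then 0 else st.count v := by
          intro v
          by_cases hv : v = m
          · rw [if_pos hv, List.count_eq_zero]
            intro hmem
            have := List.of_mem_filter hmem
            simp [hv] at this
          · rw [if_neg hv, hR, List.count_filter (by simp [hv])]
        have hsplit : st.Perm (List.replicate c' m ++ R) := by
          refine List.perm_iff_count.mpr fun v => ?_
          rw [List.count_append, List.count_replicate, hcountR]
          by_cases hv : v = m
          · subst hv; simp [hc']
          · have hmv : (m == v) = false := by
              simp only [beq_eq_false_iff_ne, ne_eq]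
              exact fun h => hv h.symm
            simp [hmv, hv]
        have hRlt : ∀ x ∈ R, x < m := by
          intro x hx
          have h1 := List.mem_of_mem_filter hx
          have h2 := List.of_mem_filter hx
          simp only [Bool.not_eq_true', beq_eq_false_iff_ne, ne_eq] at h2
          exact lt_of_le_of_ne (hub x h1) h2
        have hc'pos : 0 < c' := List.count_pos_iff.mpr hmmem
        have hcnn : 0 ≤ cnt.getD m 0 := getD_nonneg cnt hpos m
        have hc'c : (c' : Int) = cnt.getD m 0 := by
          rw [hc', hcount m]; omega
        rw [loopM_perm _ _ _ _ _ hsplit,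
          levelM m hm3 c' hc'pos (f' + 1) R best acc hRlt hacc (hm ▸ hbm) hf, hc'c]
        simp only [solveLoopB]
        rw [if_pos hacc, if_neg h3]
        -- the two guards now agree; compare the else branches
        refine if_congr Iff.rfl rfl ?_
        set half := PySem.Int.floordiv m 2 with hhalf
        set c := cnt.getD m 0 with hcdef
        set cnt1 := cnt.erase m with hcnt1
        set cnt2 := cnt1.insert (m - half) (cnt1.getD (m - half) 0 + c) with hcnt2
        set cnt3 := cnt2.insert half (cnt2.getD half 0 + c) with hcnt3
        obtain ⟨hh1, hh2, hh3, hh4⟩ := half_bounds m hm3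
        have hgd1 : ∀ v, cnt1.getD v 0 = if v = m then 0 else cnt.getD v 0 := by
          intro v
          rw [hcnt1, PySem.Dict.getD_eq_get?_getD, get?_erase]
          split_ifs with hv
          · rfl
          · rw [← PySem.Dict.getD_eq_get?_getD]
        have hgd2 : ∀ v, cnt2.getD v 0 =
            if v = m - half then cnt1.getD (m - half) 0 + c else cnt1.getD v 0 :=
          fun v => PySem.Dict.getD_insert ..
        have hgd3 : ∀ v, cnt3.getD v 0 =
            if v = half then cnt2.getD half 0 + c else cnt2.getD v 0 :=
          fun v => PySem.Dict.getD_insert ..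
        have hnd1 : cnt1.keys.Nodup := nodup_keys_erase cnt m hnd
        have hnd3 : cnt3.keys.Nodup :=
          PySem.Dict.nodup_keys_insert _ _ _ (PySem.Dict.nodup_keys_insert _ _ _ hnd1)
        have hpos1 : ∀ p ∈ cnt1.items, 1 ≤ p.2 := by
          intro p hp
          exact hpos p (List.mem_of_mem_filter hp)
        have hc1 : 1 ≤ c := by
          have h0 := hcount m
          have h1 : 0 < st.count m := List.count_pos_iff.mpr hmmem
          omega
        have hpos2 : ∀ p ∈ cnt2.items, 1 ≤ p.2 := by
          intro p hp
          rcases (PySem.Dict.mem_items_insert ..).mp hp with rfl | ⟨hp, _⟩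
          · have := getD_nonneg cnt1 hpos1 (m - half); simp; omega
          · exact hpos1 p hp
        have hpos3 : ∀ p ∈ cnt3.items, 1 ≤ p.2 := by
          intro p hp
          rcases (PySem.Dict.mem_items_insert ..).mp hp with rfl | ⟨hp, _⟩
          · have := getD_nonneg cnt2 hpos2 half; simp; omega
          · exact hpos2 p hp
        set st' := R ++ List.replicate c' (m - half) ++ List.replicate c' half with hst'
        have hperm3 : st'.Perm (mset cnt3.items) := by
          refine List.perm_iff_count.mpr fun v => ?_
          have h0 := getD_nonneg cnt hpos v
          rw [count_mset _ _ hnd3, hst']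
          simp only [List.count_append, List.count_replicate, hcountR, hgd3, hgd2, hgd1,
            hcount, beq_iff_eq]
          have hnn1 := getD_nonneg cnt hpos half
          have hnn2 := getD_nonneg cnt hpos (m - half)
          have hnn3 := getD_nonneg cnt hpos m
          by_cases hmm2 : m - half = half
          · simp only [hmm2]
            by_cases hv1 : v = half
            · subst hv1; split_ifs <;> omega
            · by_cases hv3 : v = m
              · subst hv3; split_ifs <;> omega
              · split_ifs <;> omega
          · by_cases hv1 : v = half
            · subst hv1; split_ifs <;> omega
            · by_cases hv2 : v = m - half
              · subst hv2; split_ifs <;> omega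
              · by_cases hv3 : v = m
                · subst hv3; split_ifs <;> omega
                · split_ifs <;> omega
        have hne3 : st' ≠ [] := by
          apply List.ne_nil_of_mem (a := m - half)
          rw [hst']
          exact List.mem_append.mpr (Or.inl (List.mem_append.mpr (Or.inr
            (List.mem_replicate.mpr ⟨by omega, rfl⟩))))
        have hkeys3 : listMax cnt3.keys = listMax st' := by
          refine listMax_congr _ _ ?_ hne3 ?_
          · intro hk
            have : m - half ∈ cnt3.keys := by
              rw [← mem_mset_iff_keys cnt3 hpos3, ← hperm3.mem_iff, hst']
              exact List.mem_append.mpr (Or.inl (List.mem_append.mpr (Or.inr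
                (List.mem_replicate.mpr ⟨by omega, rfl⟩))))
            rw [hk] at this
            simp at this
          · intro x
            rw [hperm3.mem_iff, mem_mset_iff_keys cnt3 hpos3]
        rw [hkeys3]
        -- recurse via the induction hypothesis
        have hub' : ∀ x ∈ st', x ≤ listMax st' := fun x hx => listMax_le _ _ hx
        have hmh_le : m - half ≤ listMax st' := hub' _ (by
          rw [hst']
          exact List.mem_append.mpr (Or.inl (List.mem_append.mpr (Or.inr
            (List.mem_replicate.mpr ⟨by omega, rfl⟩)))))
        refine ih _ _ _ _ _ _ _ (by omega) (by omega) (by omega) hnd3 hpos3 hperm3 hne3 rfl ?_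
        split_ifs with hbb
        · omega
        · omega
    · rw [loopM_exit _ _ _ _ hacc, loopB_exit _ _ _ _ _ hacc]

-- ===== VERDICT (by name: the statement is the Claim_ definition above) =====
theorem solve_spec : Claim_equal_solve := by
  intro D _ hpre
  unfold Spec_solve
  simp only [solve, solve_alt]
  set Ds := pySortDesc D with hDs
  have hDne : Ds ≠ [] := pySortDesc_ne_nil D hpre
  have hsorted : Ds.Pairwise (fun a b => b ≤ a) := pySortDesc_pairwise D
  have hpermD : Ds.Perm D := pySortDesc_perm D
  have hhead : Ds.headD 0 = listMax D := by
    rw [headD_sorted_desc Ds hDne hsorted, listMax_perm _ _ hpermD]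
  rw [PySem.Dict.foldl_insert_getD_add_one_eq_counter]
  have hSne : PySem.Set.ofList D ≠ [] := by
    match D, hpre with
    | x :: t, _ =>
      exact List.ne_nil_of_mem ((PySem.Set.mem_ofList _ x).mpr List.mem_cons_self)
  have hmB : listMax (PySem.Dict.counter D).keys = listMax D := by
    rw [PySem.Dict.keys_counter]
    exact listMax_congr _ _ hSne hpre (fun x => PySem.Set.mem_ofList _ x)
  rw [hhead, hmB, loopA_eq_loopM _ Ds _ _ hDne hsorted, loopM_perm _ _ _ _ _ hpermD]
  refine loopM_eq_loopB (listMax D).toNat _ _ _ _ _ _ _ (by omega) (by omega) (by omega)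
    (PySem.Dict.nodup_keys_counter D) ?_ ?_ hpre rfl (by omega)
  · intro p hp
    rw [PySem.Dict.items_counter] at hp
    rcases List.mem_map.mp hp with ⟨k, hk, rfl⟩
    simp only []
    exact_mod_cast List.count_pos_iff.mpr ((PySem.Set.mem_ofList _ k).mp hk)
  · refine List.perm_iff_count.mpr fun v => ?_
    have hndl : ((PySem.Dict.counter D).items.map Prod.fst).Nodup :=
      PySem.Dict.nodup_keys_counter D
    rw [count_mset _ _ hndl, PySem.Dict.getD_counter]
    simp
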